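-- pv_equiv track=rewrite | github.com/HJvA/fshome | accessories/fs20/fstls.py | hex2four
-- ===== SOURCE A (Python) =====
-- def hex2four(hexnr):
-- 	''' translate received hex (num or str) to elv code where only first 2 bits mean '''
-- 	if type(hexnr) is str:
-- 		hexnr = int(hexnr,16)
-- 	m=1
-- 	cif=0
-- 	while hexnr>0:
-- 		cif += m*((hexnr & 3) +1)
-- 		hexnr = hexnr >> 2
-- 		m *= 10
-- 	return cif+m
-- ===== SOURCE B (Python) =====
-- def hex2four(hexnr):
-- 	''' translate received hex (num or str) to elv code where only first 2 bits mean '''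
-- 	if type(hexnr) is str:
-- 		hexnr = int(hexnr, 16)
-- 	# pass 1: collect the mapped 2-bit digits, least-significant first
-- 	digits = []
-- 	while hexnr > 0:
-- 		digits.append((hexnr & 3) + 1)
-- 		hexnr >>= 2
-- 	# pass 2: assemble the decimal number most-significant first, leading 1 first
-- 	result = 1
-- 	for d in reversed(digits):
-- 		result = result * 10 + d
-- 	return result
-- ===== Notes on version B (the rewrite author's own statement) =====
-- stated objective: alternative
-- what changed: Replaces A's single interleaved loop carrying a power-of-ten multiplier m and a running sum cif (with the leading 1 added after the loop) by two staged passes: first collect the mapped 2-bit digits into a list, then fold over the reversed list most-significant first starting from the leading 1, so no multiplier is maintained.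
import Mathlib
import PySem

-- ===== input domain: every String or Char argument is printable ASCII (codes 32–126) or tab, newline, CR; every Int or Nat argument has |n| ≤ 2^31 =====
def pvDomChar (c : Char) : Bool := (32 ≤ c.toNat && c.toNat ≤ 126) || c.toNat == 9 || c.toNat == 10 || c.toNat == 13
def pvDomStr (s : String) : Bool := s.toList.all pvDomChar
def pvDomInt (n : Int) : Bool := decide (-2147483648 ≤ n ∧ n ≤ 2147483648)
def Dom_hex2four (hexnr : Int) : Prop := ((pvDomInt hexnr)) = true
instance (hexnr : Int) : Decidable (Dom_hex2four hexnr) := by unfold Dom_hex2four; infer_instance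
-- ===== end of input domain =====

-- ===== PORT A =====
-- B changes: A's single loop carrying a multiplier m and running sum cif becomes two staged
-- passes (collect digit list, then fold it reversed); objective: alternative. Equal values proved below.
-- (The `type(hexnr) is str` branch is vacuous here: hexnr is an Int.)
-- `hexnr >> 2` is Lean's `hexnr >>> 2`; `hexnr & 3` is PySem.Int.band hexnr 3 (Python-exact).
def hex2fourShiftLt (n : Int) (h : 0 < n) : (n >>> (2:Nat)).toNat < n.toNat := by
  rw [Int.shiftRight_eq_div_pow]
  omega

-- while hexnr > 0: cif += m*((hexnr & 3)+1); hexnr >>= 2; m *= 10 — then return cif+m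
def hex2fourLoop (hexnr m cif : Int) : Int :=
  if h : hexnr > 0 then
    hex2fourLoop (hexnr >>> (2:Nat)) (m * 10) (cif + m * (PySem.Int.band hexnr 3 + 1))
  else cif + m
termination_by hexnr.toNat
decreasing_by exact hex2fourShiftLt _ h

def hex2four (hexnr : Int) : Int := hex2fourLoop hexnr 1 0

-- ===== PORT B =====
-- pass 1: digits = []; while hexnr > 0: digits.append((hexnr & 3) + 1); hexnr >>= 2
-- (append-at-end modelled by returning the list head-first in append order)
def hex2fourDigits (n : Int) : List Int :=
  if h : n > 0 then (PySem.Int.band n 3 + 1) :: hex2fourDigits (n >>> (2:Nat))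
  else []
termination_by n.toNat
decreasing_by exact hex2fourShiftLt _ h

-- pass 2: result = 1; for d in reversed(digits): result = result * 10 + d
def hex2four_alt (hexnr : Int) : Int :=
  (hex2fourDigits hexnr).reverse.foldl (fun result d => result * 10 + d) 1

-- ===== PRECONDITION & SPEC =====
def Spec_hex2four (hexnr : Int) (out : Int) : Prop := out = hex2four_alt hexnr
instance (hexnr : Int) (out : Int) : Decidable (Spec_hex2four hexnr out) := by unfold Spec_hex2four; infer_instance

-- ===== CLAIM (what is proved, stated in full; the proofs are below) =====
def Claim_equal_hex2four : Prop := ∀ (hexnr : Int), Dom_hex2four hexnr → Spec_hex2four hexnr (hex2four hexnr)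

-- ===== LEMMAS AND PROOFS =====
-- B's staged value satisfies the head-step recurrence F n = F (n >>> 2) * 10 + digit.
lemma alt_step (n : Int) (h : 0 < n) :
    hex2four_alt n = hex2four_alt (n >>> (2:Nat)) * 10 + (PySem.Int.band n 3 + 1) := by
  unfold hex2four_alt
  rw [hex2fourDigits.eq_def, dif_pos h]
  simp [List.foldl_append]

-- Loop invariant: A's loop computes cif + m * (B's value).
lemma hex2fourLoop_eq_alt (k : Nat) : ∀ (n : Int), n.toNat = k → ∀ (m cif : Int),
    hex2fourLoop n m cif = cif + m * hex2four_alt n := by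
  induction k using Nat.strong_induction_on with
  | _ k ih =>
    intro n hk m cif
    rw [hex2fourLoop.eq_def]
    by_cases h : 0 < n
    · rw [dif_pos h, ih (n >>> (2:Nat)).toNat (hk ▸ hex2fourShiftLt n h) _ rfl,
        alt_step n h]
      ring
    · rw [dif_neg h]
      unfold hex2four_alt
      rw [hex2fourDigits.eq_def, dif_neg h]
      simp

-- ===== VERDICT (by name: the statement is the Claim_ definition above) =====
theorem hex2four_spec : Claim_equal_hex2four := by
  intro hexnr _
  show hex2four hexnr = hex2four_alt hexnr
  rw [hex2four, hex2fourLoop_eq_alt hexnr.toNat hexnr rfl]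
  ring
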